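-- pv_equiv track=rewrite | github.com/rafmkyrie/MIV-TP-IA | IA1 - Représentation des Connaissances/tp_SAT/inferer.py | make_cnf_file
-- ===== SOURCE A (Python) =====
-- def count_variables(clauses):
--     '''
--         Fonction qui compte le nombre de variables présentes dans une liste de clauses
--     '''
--     variables = []
--     for clause in clauses:
--         for litteral in clause:
--             if abs(litteral) not in variables:
--                 variables.append(abs(litteral))
--     return len(variables)
--
-- def make_cnf_file(clauses):
--     '''
--         Fonction qui crée un fichier CNF à partir de clauses données en paramètres
--     '''
--     nb_variables = count_variables(clauses)
--     nb_clauses = len(clauses)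
--     file = "p cnf "+str(nb_variables)+" "+str(nb_clauses)+"\n"
--     for clause in clauses:
--         for litteral in clause:
--             file += str(litteral)+ " "
--         file += "0\n"
--     return file
-- ===== SOURCE B (Python) =====
-- def make_cnf_file(clauses):
--     '''
--         Sort-then-scan variable count plus join-based line assembly.
--     '''
--     flat = sorted(abs(l) for clause in clauses for l in clause)
--     nb_variables = 0
--     prev = None
--     for v in flat:
--         if v != prev:
--             nb_variables += 1
--             prev = v
--     lines = ["p cnf " + str(nb_variables) + " " + str(len(clauses))] \
--         + [" ".join([str(l) for l in clause] + ["0"]) for clause in clauses]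
--     return "\n".join(lines) + "\n"
-- ===== Notes on version B (the rewrite author's own statement) =====
-- stated objective: alternative
-- what changed: Replaces A's first-occurrence membership-list variable count with sort-then-scan over the flattened |literal|s (count positions where the sorted value changes), and replaces A's incremental string concatenation with join over per-clause ' '.join lines.
import Mathlib
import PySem

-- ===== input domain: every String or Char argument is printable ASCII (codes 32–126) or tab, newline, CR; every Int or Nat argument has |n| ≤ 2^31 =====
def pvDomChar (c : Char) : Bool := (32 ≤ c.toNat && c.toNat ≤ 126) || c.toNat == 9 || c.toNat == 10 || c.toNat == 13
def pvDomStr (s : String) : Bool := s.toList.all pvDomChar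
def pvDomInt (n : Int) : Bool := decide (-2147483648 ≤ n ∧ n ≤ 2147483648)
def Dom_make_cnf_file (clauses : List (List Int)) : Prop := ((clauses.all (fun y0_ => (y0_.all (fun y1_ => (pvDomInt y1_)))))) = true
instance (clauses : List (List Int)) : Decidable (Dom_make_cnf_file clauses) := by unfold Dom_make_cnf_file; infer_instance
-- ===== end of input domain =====

-- B counts the variables by sorting the flattened |literal|s and scanning for value changes,
-- and assembles the output by joining per-clause ' '-joined lines (objective: alternative).

-- ===== PORT A =====
def count_variables (clauses : List (List Int)) : Int :=
  ((clauses.foldl (fun vars clause =>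
      clause.foldl (fun vars l =>
        if vars.contains |l| then vars else vars ++ [|l|]) vars)
    ([] : List Int)).length : Int)

def make_cnf_file (clauses : List (List Int)) : String :=
  let nb_variables := count_variables clauses
  let nb_clauses : Int := clauses.length
  let file := "p cnf " ++ PySem.Int.toStr nb_variables ++ " " ++ PySem.Int.toStr nb_clauses ++ "\n"
  clauses.foldl (fun file clause =>
    (clause.foldl (fun file l => file ++ PySem.Int.toStr l ++ " ") file) ++ "0\n") file

-- ===== PORT B =====
def make_cnf_file_alt (clauses : List (List Int)) : String :=
  let flat := PySem.List.sorted (clauses.flatMap (fun clause => clause.map (fun l => |l|))) (fun x => x)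
  let r := flat.foldl (fun (st : Int × Option Int) v =>
      if st.2 ≠ some v then (st.1 + 1, some v) else st) ((0 : Int), (none : Option Int))
  let lines := ["p cnf " ++ PySem.Int.toStr r.1 ++ " " ++ PySem.Int.toStr (clauses.length : Int)]
      ++ clauses.map (fun clause => PySem.Str.join " " (clause.map PySem.Int.toStr ++ ["0"]))
  PySem.Str.join "\n" lines ++ "\n"

-- ===== PRECONDITION & SPEC =====
def Spec_make_cnf_file (clauses : List (List Int)) (out : String) : Prop := out = make_cnf_file_alt clauses
instance (clauses : List (List Int)) (out : String) : Decidable (Spec_make_cnf_file clauses out) := by unfold Spec_make_cnf_file; infer_instance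

-- ===== CLAIM (what is proved, stated in full; the proofs are below) =====
def Claim_equal_make_cnf_file : Prop := ∀ (clauses : List (List Int)), Dom_make_cnf_file clauses → Spec_make_cnf_file clauses (make_cnf_file clauses)

-- ===== LEMMAS AND PROOFS =====

-- A's first-occurrence accumulator: nodup, and its elements are the initial ones plus the scanned ones.
theorem dedup_fold_spec (xs : List Int) : ∀ (acc : List Int), acc.Nodup →
    (xs.foldl (fun vars v => if vars.contains v then vars else vars ++ [v]) acc).Nodup ∧
    (xs.foldl (fun vars v => if vars.contains v then vars else vars ++ [v]) acc).toFinset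
      = acc.toFinset ∪ xs.toFinset := by
  induction xs with
  | nil => intro acc h; simp [h]
  | cons v t ih =>
    intro acc h
    simp only [List.foldl_cons]
    by_cases hv : acc.contains v
    · rw [if_pos hv]
      obtain ⟨h1, h2⟩ := ih acc h
      refine ⟨h1, h2.trans ?_⟩
      have hmem : v ∈ acc.toFinset := by simpa using hv
      rw [List.toFinset_cons, Finset.union_insert,
        Finset.insert_eq_self.mpr (Finset.mem_union_left _ hmem)]
    · rw [if_neg hv]
      have hvn : v ∉ acc := by simpa using hv
      have hn : (acc ++ [v]).Nodup := by
        simp [List.nodup_append, h]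
        exact fun a ha h' => hvn (h' ▸ ha)
      obtain ⟨h1, h2⟩ := ih (acc ++ [v]) hn
      refine ⟨h1, h2.trans ?_⟩
      ext x
      simp only [Finset.mem_union, List.toFinset_append, List.toFinset_cons, List.toFinset_nil,
        Finset.mem_insert, List.mem_toFinset, Finset.notMem_empty, or_false]
      tauto

-- B's change-scan step (the lambda in make_cnf_file_alt, named for the lemmas).
def scanStep (st : Int × Option Int) (v : Int) : Int × Option Int :=
  if st.2 ≠ some v then (st.1 + 1, some v) else st

-- On a sorted tail all of whose elements dominate the previous value, the scan adds the
-- number of distinct values other than the previous one.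
theorem scan_fold_some (l : List Int) : ∀ (n p : Int), l.Pairwise (· ≤ ·) → (∀ x ∈ l, p ≤ x) →
    (l.foldl scanStep (n, some p)).1 = n + ((l.toFinset.erase p).card : Int) := by
  induction l with
  | nil => intro n p _ _; simp
  | cons v t ih =>
    intro n p hp hlb
    have hpt : t.Pairwise (· ≤ ·) := hp.of_cons
    have hvt : ∀ x ∈ t, v ≤ x := (List.pairwise_cons.mp hp).1
    by_cases hpv : p = v
    · subst hpv
      have hstep : scanStep (n, some p) p = (n, some p) := by simp [scanStep]
      rw [List.foldl_cons, hstep, ih n p hpt hvt]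
      congr 2
      rw [List.toFinset_cons, Finset.erase_insert_eq_erase]
    · have hstep : scanStep (n, some p) v = (n + 1, some v) := by
        unfold scanStep
        rw [if_pos (by simpa using hpv)]
      rw [List.foldl_cons, hstep, ih (n + 1) v hpt hvt]
      have hpnot : p ∉ (v :: t).toFinset := by
        simp only [List.toFinset_cons, Finset.mem_insert, List.mem_toFinset]
        rintro (h | h)
        · exact hpv h
        · exact hpv (le_antisymm (hlb v (List.mem_cons_self ..)) (hvt p h))
      rw [Finset.erase_eq_of_notMem hpnot, List.toFinset_cons]
      by_cases hvmem : v ∈ t.toFinset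
      · rw [Finset.insert_eq_self.mpr hvmem]
        have := Finset.card_erase_add_one hvmem
        push_cast [← this]
        ring
      · rw [Finset.card_insert_of_notMem hvmem, Finset.erase_eq_of_notMem hvmem]
        push_cast
        ring

-- From the empty scan state the scan counts the distinct values of a sorted list.
theorem scan_fold_none (l : List Int) (hp : l.Pairwise (· ≤ ·)) :
    (l.foldl scanStep ((0 : Int), (none : Option Int))).1 = (l.toFinset.card : Int) := by
  cases l with
  | nil => simp
  | cons v t =>
    have hstep : scanStep ((0 : Int), (none : Option Int)) v = (1, some v) := by
      simp [scanStep]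
    rw [List.foldl_cons, hstep,
      scan_fold_some t 1 v hp.of_cons (List.pairwise_cons.mp hp).1, List.toFinset_cons]
    by_cases hvmem : v ∈ t.toFinset
    · rw [Finset.insert_eq_self.mpr hvmem]
      have := Finset.card_erase_add_one hvmem
      push_cast [← this]
      ring
    · rw [Finset.card_insert_of_notMem hvmem, Finset.erase_eq_of_notMem hvmem]
      push_cast
      ring

-- A's membership-list count equals B's sorted-scan count: both are the card of the set of |literal|s.
theorem count_eq (clauses : List (List Int)) :
    count_variables clauses
      = ((PySem.List.sorted (clauses.flatMap (fun clause => clause.map (fun l => |l|))) (fun x => x)).foldl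
          scanStep ((0 : Int), (none : Option Int))).1 := by
  set flat := clauses.flatMap (fun clause => clause.map (fun l => |l|)) with hflat
  have hsorted : (PySem.List.sorted flat (fun x => x)).Pairwise (· ≤ ·) := by
    simpa using PySem.List.sorted_pairwise flat (fun x => x)
  rw [scan_fold_none _ hsorted,
    List.toFinset_eq_of_perm _ _ (PySem.List.sorted_perm flat (fun x => x) false)]
  unfold count_variables
  have hnest : (clauses.foldl (fun vars clause =>
      clause.foldl (fun vars l =>
        if vars.contains |l| then vars else vars ++ [|l|]) vars) ([] : List Int))
      = flat.foldl (fun vars v => if vars.contains v then vars else vars ++ [v]) [] := by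
    rw [hflat, List.foldl_flatMap]
    simp [List.foldl_map]
  rw [hnest]
  obtain ⟨h1, h2⟩ := dedup_fold_spec flat [] List.nodup_nil
  rw [show ((flat.foldl (fun vars v => if vars.contains v then vars else vars ++ [v]) []).length)
      = flat.toFinset.card from by rw [← List.toFinset_card_of_nodup h1, h2]; simp]

-- sep.join on a cons with a nonempty tail, and on a singleton.
theorem str_join_cons (sep a : String) (parts : List String) (h : parts ≠ []) :
    PySem.Str.join sep (a :: parts) = a ++ sep ++ PySem.Str.join sep parts := by
  obtain ⟨q, rest, rfl⟩ := List.exists_cons_of_ne_nil h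
  apply String.ext
  simp [PySem.Str.toList_join, PySem.Chars.join_cons_cons, String.toList_append]

theorem str_join_singleton (sep a : String) : PySem.Str.join sep [a] = a := by
  apply String.ext
  simp [PySem.Str.toList_join, PySem.Chars.join, List.intercalate]

-- A's string-building fold factors its accumulator to the front.
theorem inner_factor (clause : List Int) (s t : String) :
    clause.foldl (fun b l => b ++ PySem.Int.toStr l ++ " ") (s ++ t)
    = s ++ clause.foldl (fun b l => b ++ PySem.Int.toStr l ++ " ") t := by
  induction clause generalizing t with
  | nil => rfl
  | cons x xs ih =>
    simp only [List.foldl, String.append_assoc] at ih ⊢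
    rw [ih]

-- A's one-clause text is B's ' '-joined line plus its newline.
theorem line_eq (c : List Int) :
    (c.foldl (fun b l => b ++ PySem.Int.toStr l ++ " ") "") ++ "0\n"
    = PySem.Str.join " " (c.map PySem.Int.toStr ++ ["0"]) ++ "\n" := by
  induction c with
  | nil =>
    simp only [List.foldl_nil, List.map_nil, List.nil_append]
    rw [str_join_singleton]
    decide
  | cons x t ih =>
    have h1 : ("" : String) ++ PySem.Int.toStr x ++ " " = (PySem.Int.toStr x ++ " ") ++ "" := by
      simp
    simp only [List.foldl_cons, List.map_cons, List.cons_append]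
    rw [h1, inner_factor, String.append_assoc, String.append_assoc]
    rw [str_join_cons " " (PySem.Int.toStr x) _ (by simp), ih]
    simp [String.append_assoc]

-- A's body fold is the concatenation of B's newline-terminated lines.
theorem body_eq (clauses : List (List Int)) : ∀ (s : String),
    clauses.foldl (fun file clause =>
      (clause.foldl (fun file l => file ++ PySem.Int.toStr l ++ " ") file) ++ "0\n") s
    = s ++ ((clauses.map (fun clause =>
        PySem.Str.join " " (clause.map PySem.Int.toStr ++ ["0"]) ++ "\n")).foldr (· ++ ·) "") := by
  induction clauses with
  | nil => intro s; simp
  | cons c cs ih =>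
    intro s
    simp only [List.foldl_cons, List.map_cons, List.foldr_cons]
    have hs : c.foldl (fun file l => file ++ PySem.Int.toStr l ++ " ") s
        = s ++ c.foldl (fun file l => file ++ PySem.Int.toStr l ++ " ") "" := by
      have := inner_factor c s ""
      simpa using this
    rw [hs, String.append_assoc, line_eq, ih]
    simp [String.append_assoc]

-- B's '\n'.join plus final newline is the concatenation of newline-terminated lines.
theorem join_newline (a : String) (ls : List String) :
    PySem.Str.join "\n" (a :: ls) ++ "\n"
    = (a ++ "\n") ++ ((ls.map (· ++ "\n")).foldr (· ++ ·) "") := by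
  induction ls generalizing a with
  | nil => rw [str_join_singleton]; simp
  | cons b bs ih =>
    rw [str_join_cons "\n" a _ (by simp)]
    simp only [List.map_cons, List.foldr_cons]
    rw [String.append_assoc, String.append_assoc, ih b]
    simp [String.append_assoc]

-- ===== VERDICT (by name: the statement is the Claim_ definition above) =====
theorem make_cnf_file_spec : Claim_equal_make_cnf_file := by
  intro clauses _
  unfold Spec_make_cnf_file make_cnf_file make_cnf_file_alt
  simp only []
  rw [body_eq]
  rw [show (fun (st : Int × Option Int) v =>
      if st.2 ≠ some v then (st.1 + 1, some v) else st) = scanStep from rfl]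
  rw [← count_eq]
  rw [List.singleton_append, join_newline, List.map_map]
  simp [String.append_assoc, Function.comp_def]
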